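-- pv_equiv track=rewrite | github.com/MrBrantCode/unitest_baseline | mut_generate/mist_train_cf/cf_55830/solution.py | replace_third_occurrences
-- ===== SOURCE A (Python) =====
-- def replace_third_occurrences(input_string):
--     count = 0
--     output_string = ""
--
--     for char in input_string:
--         if char.lower() == 'a':
--             count += 1
--             if count % 3 == 0:
--                 output_string += '#'
--             else:
--                 output_string += char
--         else:
--             output_string += char
--
--     return output_string
-- ===== SOURCE B (Python) =====
-- def replace_third_occurrences(input_string):
--     positions = [i for i, ch in enumerate(input_string) if ch.lower() == 'a']
--     to_replace = {p for k, p in enumerate(positions) if k % 3 == 2}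
--     return ''.join('#' if i in to_replace else ch for i, ch in enumerate(input_string))
-- ===== Notes on version B (the rewrite author's own statement) =====
-- stated objective: alternative
-- what changed: Replaces the single running-counter accumulation pass with an index-table decomposition: first collect the indices of all matching characters, select every third such index into a set, then rebuild the string by index lookup.
import Mathlib
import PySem

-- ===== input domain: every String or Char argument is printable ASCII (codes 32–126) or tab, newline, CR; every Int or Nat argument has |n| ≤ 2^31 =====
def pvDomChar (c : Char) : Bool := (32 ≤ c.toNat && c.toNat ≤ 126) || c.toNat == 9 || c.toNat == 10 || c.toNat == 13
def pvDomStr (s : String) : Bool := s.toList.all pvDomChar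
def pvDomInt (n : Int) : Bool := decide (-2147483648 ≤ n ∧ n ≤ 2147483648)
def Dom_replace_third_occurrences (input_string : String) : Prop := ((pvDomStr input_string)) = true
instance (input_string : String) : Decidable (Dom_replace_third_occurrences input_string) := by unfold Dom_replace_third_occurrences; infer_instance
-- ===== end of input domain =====

-- B replaces A's single running-counter pass by an index-table decomposition: collect the
-- indices of the matching characters, pick every third into a set, rebuild by index lookup
-- (objective: alternative decomposition; same cost).

-- ===== PORT A =====
def replace_third_occurrences (input_string : String) : String :=
  let r := input_string.toList.foldl
    (fun (acc : Int × List Char) char =>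
      if PySem.Chars.lowerChar char == 'a' then
        let count := acc.1 + 1
        if PySem.Int.mod count 3 == 0 then (count, acc.2 ++ ['#'])
        else (count, acc.2 ++ [char])
      else (acc.1, acc.2 ++ [char]))
    (0, [])
  String.ofList r.2

-- ===== PORT B =====
def replace_third_occurrences_alt (input_string : String) : String :=
  let cs := input_string.toList
  let positions :=
    ((PySem.List.enumerate cs).filter (fun p => PySem.Chars.lowerChar p.2 == 'a')).map (·.1)
  let toReplace : PySem.Set Int :=
    PySem.Set.ofList
      (((PySem.List.enumerate positions).filter (fun q => PySem.Int.mod q.1 3 == 2)).map (·.2))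
  String.ofList ((PySem.List.enumerate cs).map (fun p => if toReplace.contains p.1 then '#' else p.2))

-- ===== PRECONDITION & SPEC =====
def Spec_replace_third_occurrences (input_string : String) (out : String) : Prop := out = replace_third_occurrences_alt input_string
instance (input_string : String) (out : String) : Decidable (Spec_replace_third_occurrences input_string out) := by unfold Spec_replace_third_occurrences; infer_instance

-- ===== CLAIM (what is proved, stated in full; the proofs are below) =====
def Claim_equal_replace_third_occurrences : Prop := ∀ (input_string : String), Dom_replace_third_occurrences input_string → Spec_replace_third_occurrences input_string (replace_third_occurrences input_string)

-- ===== LEMMAS AND PROOFS =====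

-- is this character an 'a' in the sense both programs test?
def pvIsA (c : Char) : Bool := PySem.Chars.lowerChar c == 'a'

-- reference result: walk the chars carrying the count of 'a's seen so far
def pvSpec : List Char → Nat → List Char
  | [], _ => []
  | c :: r, n =>
    if pvIsA c then (if (n + 1) % 3 == 0 then '#' else c) :: pvSpec r (n + 1)
    else c :: pvSpec r n

-- indices (from j) of the 'a'-like characters
def pvAIdx : List Char → Nat → List Int
  | [], _ => []
  | c :: r, j => if pvIsA c then (j : Int) :: pvAIdx r (j + 1) else pvAIdx r (j + 1)

-- every third element, rank counted from n
def pvSel : List Int → Nat → List Int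
  | [], _ => []
  | p :: ps, n => if n % 3 == 2 then p :: pvSel ps (n + 1) else pvSel ps (n + 1)

lemma pvAIdx_cons_isA {c : Char} (r : List Char) (j : Nat) (h : pvIsA c = true) :
    pvAIdx (c :: r) j = (j : Int) :: pvAIdx r (j + 1) := by simp [pvAIdx, h]

lemma pvAIdx_cons_not {c : Char} (r : List Char) (j : Nat) (h : pvIsA c = false) :
    pvAIdx (c :: r) j = pvAIdx r (j + 1) := by simp [pvAIdx, h]

lemma pvSel_cons_sel {p : Int} (ps : List Int) {n : Nat} (h : n % 3 = 2) :
    pvSel (p :: ps) n = p :: pvSel ps (n + 1) := by simp [pvSel, h]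

lemma pvSel_cons_not {p : Int} (ps : List Int) {n : Nat} (h : ¬ n % 3 = 2) :
    pvSel (p :: ps) n = pvSel ps (n + 1) := by simp [pvSel, h]

lemma pvCast_succ (n : Nat) : ((n : Int) + 1) = (((n + 1 : Nat)) : Int) := by push_cast; ring

lemma pvA_loop (l : List Char) (n : Nat) (out : List Char) :
    (l.foldl
      (fun (acc : Int × List Char) char =>
        if PySem.Chars.lowerChar char == 'a' then
          let count := acc.1 + 1
          if PySem.Int.mod count 3 == 0 then (count, acc.2 ++ ['#'])
          else (count, acc.2 ++ [char])
        else (acc.1, acc.2 ++ [char]))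
      ((n : Int), out)).2 = out ++ pvSpec l n := by
  induction l generalizing n out with
  | nil => simp [pvSpec]
  | cons c r ih =>
    rw [List.foldl_cons]
    by_cases hA : PySem.Chars.lowerChar c = 'a'
    · have hmod : PySem.Int.mod ((n : Int) + 1) 3 = (((n + 1) % 3 : Nat) : Int) := by
        rw [pvCast_succ]
        exact_mod_cast PySem.Int.mod_natCast (n + 1) 3
      by_cases h3 : (n + 1) % 3 = 0
      · have hc : (PySem.Int.mod ((n : Int) + 1) 3 == 0) = true := by
          rw [hmod, h3]; rfl
        simp only [hA, beq_self_eq_true, if_true, hc]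
        rw [pvCast_succ, ih]
        simp [pvSpec, pvIsA, hA, h3]
      · have hc : (PySem.Int.mod ((n : Int) + 1) 3 == 0) = false := by
          rw [hmod]
          simp only [beq_eq_false_iff_ne, ne_eq, Int.natCast_eq_zero]
          exact h3
        simp only [hA, beq_self_eq_true, if_true, hc, Bool.false_eq_true, if_false]
        rw [pvCast_succ, ih]
        simp [pvSpec, pvIsA, hA, h3]
    · have hc : (PySem.Chars.lowerChar c == 'a') = false := by
        simp [hA]
      simp only [hc, Bool.false_eq_true, if_false]
      rw [ih]
      simp [pvSpec, pvIsA, hA]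

lemma pvAIdx_eq (l : List Char) (j : Nat) :
    ((PySem.List.enumerate l (j : Int)).filter (fun p => PySem.Chars.lowerChar p.2 == 'a')).map (·.1)
      = pvAIdx l j := by
  induction l generalizing j with
  | nil => simp [PySem.List.enumerate_nil, pvAIdx]
  | cons c r ih =>
    rw [PySem.List.enumerate_cons, pvCast_succ]
    by_cases hA : PySem.Chars.lowerChar c = 'a'
    · rw [pvAIdx_cons_isA r j (by simp [pvIsA, hA])]
      simp only [List.filter_cons, hA, beq_self_eq_true, if_true, List.map_cons]
      rw [ih]
    · rw [pvAIdx_cons_not r j (by simp [pvIsA, hA])]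
      have hc : (PySem.Chars.lowerChar c == 'a') = false := by simp [hA]
      simp only [List.filter_cons, hc, Bool.false_eq_true, if_false]
      exact ih (j + 1)

lemma pvSel_eq (ps : List Int) (n : Nat) :
    ((PySem.List.enumerate ps (n : Int)).filter (fun q => PySem.Int.mod q.1 3 == 2)).map (·.2)
      = pvSel ps n := by
  induction ps generalizing n with
  | nil => simp [PySem.List.enumerate_nil, pvSel]
  | cons p ps ih =>
    rw [PySem.List.enumerate_cons, pvCast_succ]
    have hmod : PySem.Int.mod (n : Int) 3 = ((n % 3 : Nat) : Int) := by
      exact_mod_cast PySem.Int.mod_natCast n 3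
    by_cases h3 : n % 3 = 2
    · have hc : (PySem.Int.mod (n : Int) 3 == 2) = true := by rw [hmod, h3]; rfl
      rw [pvSel_cons_sel ps h3]
      simp only [List.filter_cons, hc, if_true, List.map_cons]
      rw [ih]
    · have hc : (PySem.Int.mod (n : Int) 3 == 2) = false := by
        rw [hmod]
        simp only [beq_eq_false_iff_ne, ne_eq]
        exact_mod_cast h3
      rw [pvSel_cons_not ps h3]
      simp only [List.filter_cons, hc, Bool.false_eq_true, if_false]
      exact ih (n + 1)

lemma pvAIdx_ge {l : List Char} {j : Nat} {i : Int} (h : i ∈ pvAIdx l j) : (j : Int) ≤ i := by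
  induction l generalizing j with
  | nil => simp [pvAIdx] at h
  | cons c r ih =>
    by_cases hA : pvIsA c
    · rw [pvAIdx_cons_isA r j hA] at h
      rcases List.mem_cons.mp h with h | h
      · omega
      · have := ih h; omega
    · rw [pvAIdx_cons_not r j (by simpa using hA)] at h
      have := ih h; omega

lemma pvSel_subset {ps : List Int} {n : Nat} {i : Int} (h : i ∈ pvSel ps n) : i ∈ ps := by
  induction ps generalizing n with
  | nil => simp [pvSel] at h
  | cons p ps ih =>
    by_cases h3 : n % 3 = 2
    · rw [pvSel_cons_sel ps h3] at h
      rcases List.mem_cons.mp h with h | h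
      · simp [h]
      · exact List.mem_cons_of_mem _ (ih h)
    · rw [pvSel_cons_not ps h3] at h
      exact List.mem_cons_of_mem _ (ih h)

lemma pvMain (l : List Char) (j n : Nat) (S : PySem.Set Int)
    (hS : ∀ k : Nat, j ≤ k → ((k : Int) ∈ S ↔ (k : Int) ∈ pvSel (pvAIdx l j) n)) :
    (PySem.List.enumerate l (j : Int)).map (fun p => if S.contains p.1 then '#' else p.2)
      = pvSpec l n := by
  induction l generalizing j n with
  | nil => simp [PySem.List.enumerate_nil, pvSpec]
  | cons c r ih =>
    rw [PySem.List.enumerate_cons, pvCast_succ, List.map_cons]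
    by_cases hA : pvIsA c
    · have hhead : ((j : Int) ∈ S) ↔ n % 3 = 2 := by
        rw [hS j le_rfl, pvAIdx_cons_isA r j hA]
        by_cases h3 : n % 3 = 2
        · rw [pvSel_cons_sel _ h3]
          simp [h3]
        · rw [pvSel_cons_not _ h3]
          constructor
          · intro hmem
            exfalso
            have hge := pvAIdx_ge (pvSel_subset hmem)
            omega
          · intro hmem; exact absurd hmem h3
      have htailS : ∀ k : Nat, j + 1 ≤ k →
          ((k : Int) ∈ S ↔ (k : Int) ∈ pvSel (pvAIdx r (j + 1)) (n + 1)) := by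
        intro k hk
        rw [hS k (by omega), pvAIdx_cons_isA r j hA]
        by_cases h3 : n % 3 = 2
        · rw [pvSel_cons_sel _ h3]
          constructor
          · intro hmem
            rcases List.mem_cons.mp hmem with h | h
            · exfalso
              have : (k : Int) = (j : Int) := h
              omega
            · exact h
          · intro hmem; exact List.mem_cons_of_mem _ hmem
        · rw [pvSel_cons_not _ h3]
      rw [ih (j + 1) (n + 1) htailS]
      by_cases h3 : n % 3 = 2
      · have hmem : ((j : Int)) ∈ S := hhead.mpr h3
        have h30 : ((n + 1) % 3 == 0) = true := by
          have : (n + 1) % 3 = 0 := by omega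
          rw [this]; rfl
        simp [pvSpec, PySem.Set.contains, hA, h30, hmem]
      · have hmem : ¬ ((j : Int)) ∈ S := fun hm => h3 (hhead.mp hm)
        have h30 : ((n + 1) % 3 == 0) = false := by
          have : ¬ (n + 1) % 3 = 0 := by omega
          simpa using this
        simp [pvSpec, PySem.Set.contains, hA, h30, hmem]
    · have hhead : ¬ ((j : Int) ∈ S) := by
        rw [hS j le_rfl, pvAIdx_cons_not r j (by simpa using hA)]
        intro hmem
        have hge := pvAIdx_ge (pvSel_subset hmem)
        omega
      have htailS : ∀ k : Nat, j + 1 ≤ k →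
          ((k : Int) ∈ S ↔ (k : Int) ∈ pvSel (pvAIdx r (j + 1)) n) := by
        intro k hk
        rw [hS k (by omega), pvAIdx_cons_not r j (by simpa using hA)]
      rw [ih (j + 1) n htailS]
      simp [pvSpec, PySem.Set.contains, hA, hhead]

lemma pvB_list_eq (cs : List Char) :
    (PySem.List.enumerate cs ((0 : Nat) : Int)).map
      (fun p =>
        if (PySem.Set.ofList
              (((PySem.List.enumerate
                    (((PySem.List.enumerate cs ((0 : Nat) : Int)).filter
                        (fun p => PySem.Chars.lowerChar p.2 == 'a')).map (·.1))
                    ((0 : Nat) : Int)).filter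
                  (fun q => PySem.Int.mod q.1 3 == 2)).map (·.2))).contains p.1
        then '#' else p.2)
      = pvSpec cs 0 := by
  apply pvMain cs 0 0
  intro k _
  rw [PySem.Set.mem_ofList, pvAIdx_eq cs 0, pvSel_eq (pvAIdx cs 0) 0]

-- ===== VERDICT (by name: the statement is the Claim_ definition above) =====
theorem replace_third_occurrences_spec : Claim_equal_replace_third_occurrences := by
  intro s _hDom
  show String.ofList _ = String.ofList _
  exact congrArg String.ofList ((pvA_loop s.toList 0 []).trans (pvB_list_eq s.toList).symm)
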